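-- pv_equiv track=rewrite | github.com/TejaRaghuveer/dft-stil-verification-framework | python/pattern_debug/visualization_tools.py | fault_distribution_relative_to_failures
-- ===== SOURCE A (Python) =====
-- from collections import defaultdict
-- from typing import Any, Dict, List
--
-- def fault_distribution_relative_to_failures(
--
--     faults: List[Dict[str, Any]],
--     failures: List[Dict[str, Any]],
-- ) -> Dict[str, Any]:
--     fail_ids = {str(f.get("fault_id", "")) for f in failures}
--     by_type: Dict[str, Dict[str, int]] = defaultdict(lambda: {"total": 0, "failed": 0})
--     for ft in faults:
--         t = str(ft.get("fault_type", "UNKNOWN"))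
--         fid = str(ft.get("fault_id", ""))
--         by_type[t]["total"] += 1
--         if fid in fail_ids:
--             by_type[t]["failed"] += 1
--     return dict(by_type)
-- ===== SOURCE B (Python) =====
-- from collections import Counter
--
--
-- def fault_distribution_relative_to_failures(faults, failures):
--     fail_ids = {str(f.get("fault_id", "")) for f in failures}
--     totals = Counter(str(ft.get("fault_type", "UNKNOWN")) for ft in faults)
--     failed = Counter(
--         str(ft.get("fault_type", "UNKNOWN"))
--         for ft in faults
--         if str(ft.get("fault_id", "")) in fail_ids
--     )
--     return {t: {"total": totals[t], "failed": failed.get(t, 0)} for t in totals}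
-- ===== Notes on version B (the rewrite author's own statement) =====
-- stated objective: alternative
-- what changed: Replaced the single combined accumulation loop with nested-dict mutation by two independent Counter passes (totals over all faults, failed over only faults whose id is in fail_ids) assembled into the result dict in one comprehension.
import Mathlib
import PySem

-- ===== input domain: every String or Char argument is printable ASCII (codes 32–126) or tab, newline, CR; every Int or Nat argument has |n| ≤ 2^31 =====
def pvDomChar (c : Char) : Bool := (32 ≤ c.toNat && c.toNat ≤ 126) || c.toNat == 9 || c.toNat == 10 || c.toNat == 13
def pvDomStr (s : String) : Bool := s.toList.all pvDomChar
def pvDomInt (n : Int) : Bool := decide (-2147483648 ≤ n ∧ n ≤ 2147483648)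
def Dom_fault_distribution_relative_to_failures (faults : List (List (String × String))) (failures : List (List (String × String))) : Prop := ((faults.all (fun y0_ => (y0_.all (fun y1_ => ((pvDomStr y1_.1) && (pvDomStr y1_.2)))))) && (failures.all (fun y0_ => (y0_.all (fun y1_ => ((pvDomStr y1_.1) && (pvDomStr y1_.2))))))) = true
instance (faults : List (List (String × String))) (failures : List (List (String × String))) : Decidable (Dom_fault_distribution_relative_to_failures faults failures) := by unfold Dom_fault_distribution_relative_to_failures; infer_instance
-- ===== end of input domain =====

-- B replaces A's single combined accumulation loop over a defaultdict of nested dicts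
-- by two independent counting passes (all faults / only failed faults) assembled afterwards;
-- objective: alternative decomposition, same cost.

-- ===== PORT A =====
-- str(d.get(k, dflt)) on a string-valued dict is d.get(k, dflt) itself (str of a str)
def fdType (ft : List (String × String)) : String :=
  (PySem.Dict.mk ft).getD "fault_type" "UNKNOWN"

def fdId (ft : List (String × String)) : String :=
  (PySem.Dict.mk ft).getD "fault_id" ""

-- the defaultdict default {"total": 0, "failed": 0}
def fdDefault : PySem.Dict String Int := PySem.Dict.mk [("total", 0), ("failed", 0)]

-- body of A's loop: by_type[t]["total"] += 1; if fid in fail_ids: by_type[t]["failed"] += 1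
def fdStep (fail_ids : PySem.Set String) (d : PySem.Dict String (PySem.Dict String Int))
    (ft : List (String × String)) : PySem.Dict String (PySem.Dict String Int) :=
  let t := fdType ft
  let fid := fdId ft
  let cur := d.getD t fdDefault
  let cur := cur.modify "total" 0 (· + 1)
  let cur := if PySem.Set.contains fail_ids fid then cur.modify "failed" 0 (· + 1) else cur
  d.insert t cur

def fault_distribution_relative_to_failures (faults : List (List (String × String))) (failures : List (List (String × String))) : List (String × List (String × Int)) :=
  let fail_ids : PySem.Set String := PySem.Set.ofList (failures.map fdId)
  let by_type := faults.foldl (fdStep fail_ids) PySem.Dict.empty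
  by_type.items.map (fun p => (p.1, p.2.items))

-- ===== PORT B =====
def fault_distribution_relative_to_failures_alt (faults : List (List (String × String))) (failures : List (List (String × String))) : List (String × List (String × Int)) :=
  let fail_ids : PySem.Set String := PySem.Set.ofList (failures.map fdId)
  let totals : PySem.Dict String Int := PySem.Dict.counter (faults.map fdType)
  let failed : PySem.Dict String Int :=
    PySem.Dict.counter ((faults.filter (fun ft => PySem.Set.contains fail_ids (fdId ft))).map fdType)
  totals.keys.map (fun t => (t, [("total", totals.getD t 0), ("failed", failed.getD t 0)]))

-- ===== PRECONDITION & SPEC =====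
def Spec_fault_distribution_relative_to_failures (faults : List (List (String × String))) (failures : List (List (String × String))) (out : List (String × List (String × Int))) : Prop := out = fault_distribution_relative_to_failures_alt faults failures
instance (faults : List (List (String × String))) (failures : List (List (String × String))) (out : List (String × List (String × Int))) : Decidable (Spec_fault_distribution_relative_to_failures faults failures out) := by unfold Spec_fault_distribution_relative_to_failures; infer_instance

-- ===== CLAIM (what is proved, stated in full; the proofs are below) =====
def Claim_equal_fault_distribution_relative_to_failures : Prop := ∀ (faults : List (List (String × String))) (failures : List (List (String × String))), Dom_fault_distribution_relative_to_failures faults failures → Spec_fault_distribution_relative_to_failures faults failures (fault_distribution_relative_to_failures faults failures)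

-- ===== LEMMAS AND PROOFS =====

-- A's loop step, written as an insert of a computed value (for the foldl-insert lemmas)
def fdVal (S : PySem.Set String) (d : PySem.Dict String (PySem.Dict String Int))
    (ft : List (String × String)) : PySem.Dict String Int :=
  let cur := (d.getD (fdType ft) fdDefault).modify "total" 0 (· + 1)
  if PySem.Set.contains S (fdId ft) then cur.modify "failed" 0 (· + 1) else cur

theorem fdStep_eq (S : PySem.Set String) :
    fdStep S = fun d ft => d.insert (fdType ft) (fdVal S d ft) := rfl

theorem fdState_nodup (S : PySem.Set String) (fs : List (List (String × String))) :
    (fs.foldl (fun d ft => d.insert (fdType ft) (fdVal S d ft)) PySem.Dict.empty).keys.Nodup :=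
  PySem.Dict.nodup_keys_foldl_insert_key _ _ _ _ (by simp [PySem.Dict.keys_empty])

theorem fdState_keys (S : PySem.Set String) (fs : List (List (String × String))) :
    (fs.foldl (fun d ft => d.insert (fdType ft) (fdVal S d ft)) PySem.Dict.empty).keys
      = PySem.Set.ofList (fs.map fdType) := by
  rw [PySem.Dict.keys_foldl_insert_key]
  simp [PySem.Dict.keys_empty, PySem.Set.update_nil_left]

-- the accumulated dict holds, at each present type, the two counts so far
theorem fdState_getD (S : PySem.Set String) (fs : List (List (String × String))) (t : String)
    (ht : t ∈ fs.map fdType) :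
    (fs.foldl (fun d ft => d.insert (fdType ft) (fdVal S d ft)) PySem.Dict.empty).getD t fdDefault =
      PySem.Dict.mk [("total", ((fs.map fdType).count t : Int)),
                     ("failed", (((fs.filter (fun ft => PySem.Set.contains S (fdId ft))).map fdType).count t : Int))] := by
  induction fs using List.reverseRecOn with
  | nil => simp at ht
  | append_singleton fs ft ih =>
    rw [List.foldl_append, List.foldl_cons, List.foldl_nil]
    simp only [PySem.Dict.getD_insert, List.map_append, List.count_append, List.filter_append]
    by_cases h : t = fdType ft
    · subst h
      simp only [if_true]
      by_cases hmem : fdType ft ∈ fs.map fdType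
      · rw [fdVal]
        rw [ih hmem]
        by_cases hf : PySem.Set.contains S (fdId ft)
        · rw [if_pos hf]
          have hf' : (fdId ft ∈ S) := by simpa [PySem.Set.contains] using hf
          simp [hf', PySem.Dict.modify, PySem.Dict.insert, PySem.Dict.getD, PySem.Dict.get?,
            PySem.Dict.contains]
        · rw [if_neg hf]
          have hf' : ¬ (fdId ft ∈ S) := by simpa [PySem.Set.contains] using hf
          simp [hf', PySem.Dict.modify, PySem.Dict.insert, PySem.Dict.getD, PySem.Dict.get?,
            PySem.Dict.contains]
      · rw [fdVal]
        have hc : (fs.foldl (fun d ft => d.insert (fdType ft) (fdVal S d ft))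
            PySem.Dict.empty).contains (fdType ft) = false := by
          rw [PySem.Dict.contains_eq_decide_mem_keys, fdState_keys]
          simp [PySem.Set.mem_ofList, hmem]
        rw [PySem.Dict.getD_of_not_contains _ fdDefault hc]
        have c2 : fdType ft ∉ (fs.filter (fun ft => decide (fdId ft ∈ S))).map fdType := by
          intro hx
          rcases List.mem_map.1 hx with ⟨a, ha, he⟩
          exact hmem (he ▸ List.mem_map.2 ⟨a, List.mem_of_mem_filter ha, rfl⟩)
        by_cases hf : PySem.Set.contains S (fdId ft)
        · rw [if_pos hf]
          have hf' : (fdId ft ∈ S) := by simpa [PySem.Set.contains] using hf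
          simp [hf', fdDefault, PySem.Dict.modify, PySem.Dict.insert, PySem.Dict.getD,
            PySem.Dict.get?, PySem.Dict.contains, List.count_eq_zero_of_not_mem hmem,
            List.count_eq_zero_of_not_mem c2]
        · rw [if_neg hf]
          have hf' : ¬ (fdId ft ∈ S) := by simpa [PySem.Set.contains] using hf
          simp [hf', fdDefault, PySem.Dict.modify, PySem.Dict.insert, PySem.Dict.getD,
            PySem.Dict.get?, PySem.Dict.contains, List.count_eq_zero_of_not_mem hmem,
            List.count_eq_zero_of_not_mem c2]
    · rw [if_neg h]
      have ht' : t ∈ fs.map fdType := by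
        rcases List.mem_map.1 ht with ⟨a, ha, he⟩
        rcases List.mem_append.1 ha with h1 | h1
        · exact he ▸ List.mem_map.2 ⟨a, h1, rfl⟩
        · rw [List.mem_singleton] at h1; subst h1; exact absurd he.symm h
      rw [ih ht']
      have c1 : t ∉ List.map fdType [ft] := by
        intro hx
        rcases List.mem_map.1 hx with ⟨a, ha, he⟩
        rw [List.mem_singleton] at ha; subst ha; exact h he.symm
      have c2 : t ∉ ((([ft].filter (fun ft => decide (fdId ft ∈ S)))).map fdType) := by
        intro hx
        rcases List.mem_map.1 hx with ⟨a, ha, he⟩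
        exact c1 (he ▸ List.mem_map.2 ⟨a, List.mem_of_mem_filter ha, rfl⟩)
      have e1 : List.count t [fdType ft] = 0 := List.count_eq_zero.2 (by simp [h])
      have e2 : List.count t (List.map fdType (List.filter (fun ft => decide (fdId ft ∈ S)) [ft])) = 0 :=
        List.count_eq_zero.2 c2
      simp [e1, e2]

-- ===== VERDICT (by name: the statement is the Claim_ definition above) =====
theorem fault_distribution_relative_to_failures_spec : Claim_equal_fault_distribution_relative_to_failures := by
  intro faults failures _
  unfold Spec_fault_distribution_relative_to_failures
  simp only [fault_distribution_relative_to_failures, fault_distribution_relative_to_failures_alt]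
  rw [fdStep_eq]
  rw [PySem.Dict.items_eq_map_keys _ (fdState_nodup _ faults) fdDefault]
  rw [fdState_keys, List.map_map, PySem.Dict.keys_counter]
  apply List.map_congr_left
  intro t ht
  have ht' : t ∈ faults.map fdType := (PySem.Set.mem_ofList _ t).1 ht
  simp only [Function.comp_apply]
  rw [fdState_getD _ faults t ht']
  simp [PySem.Dict.getD_counter]
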